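-- pv_equiv track=rewrite | github.com/AmirTTrimA/MaktabQuera | loghat_name_2harfi.py | find_last_char
-- ===== SOURCE A (Python) =====
-- def find_last_char(n):
--
--     def generate_sequence():
--         seq = []
--         for i in range(1, 26):
--             for j in range(1, i + 1):
--                 seq.append(''.join(map(lambda x: chr(ord('A') + x), range(i))))
--         return seq
--
--     sequence = generate_sequence()
--
--     sequence.sort(key=lambda x: (len(x), x))
--
--     return sequence[n - 1][-1]
-- ===== SOURCE B (Python) =====
-- def find_last_char(n):
--     # The sorted sequence is just i copies of the length-i alphabet prefix,
--     # for i = 1..25; its k-th element's last char is chr(ord('A') + i - 1).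
--     # So build the last characters directly: no string building, no sort.
--     chars = []
--     for i in range(1, 26):
--         chars.extend([chr(ord('A') + i - 1)] * i)
--     return chars[n - 1]
-- ===== Notes on version B (the rewrite author's own statement) =====
-- stated objective: simpler
-- what changed: B skips building and sorting the list of alphabet-prefix strings: since the generated sequence is already sorted and only each string's last character matters, B directly builds the flat list of last characters (i copies of the i-th letter) and indexes it.
import Mathlib
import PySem

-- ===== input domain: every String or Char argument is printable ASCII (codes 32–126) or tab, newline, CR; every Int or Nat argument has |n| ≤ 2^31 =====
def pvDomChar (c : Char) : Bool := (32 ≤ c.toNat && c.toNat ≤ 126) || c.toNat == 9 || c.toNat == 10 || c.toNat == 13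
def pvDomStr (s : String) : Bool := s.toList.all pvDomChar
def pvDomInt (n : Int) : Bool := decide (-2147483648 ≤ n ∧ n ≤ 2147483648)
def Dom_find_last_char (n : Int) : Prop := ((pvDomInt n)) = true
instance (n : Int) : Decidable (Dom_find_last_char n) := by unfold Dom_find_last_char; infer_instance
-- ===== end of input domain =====

-- B replaces A's build-325-strings-then-sort with a direct flat list of the last characters
-- (i copies of the i-th letter), since the generated sequence is already sorted; objective: simpler.

-- ===== PORT A =====
def find_last_char (n : Int) : String :=
  -- generate_sequence: for i in range(1,26): for j in range(1,i+1): seq.append(''.join(chr(ord('A')+x) for x in range(i)))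
  let seq : List String :=
    (PySem.List.pyRange 1 26 1).foldl (fun seq i =>
      (PySem.List.pyRange 1 (i + 1) 1).foldl (fun seq _j =>
        seq ++ [PySem.Str.join "" (((PySem.List.pyRange 0 i 1).map
          (fun x => String.ofList [Char.ofNat (65 + x.toNat)])))]) seq) []
  -- sequence.sort(key=lambda x: (len(x), x))
  let sequence := PySem.List.sorted2 seq (fun x => PySem.Str.len x) (fun x => x) false
  -- sequence[n-1][-1]  (IndexError → excluded by Pre_)
  match PySem.List.pyGet? sequence (n - 1) with
  | some s => ((PySem.Str.pyGet? s (-1)).map (fun c => String.ofList [c])).getD ""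
  | none => ""

-- ===== PORT B =====
def find_last_char_alt (n : Int) : String :=
  -- chars = []; for i in range(1,26): chars.extend([chr(ord('A')+i-1)] * i)
  let chars : List Char :=
    (PySem.List.pyRange 1 26 1).foldl (fun acc i =>
      acc ++ List.replicate i.toNat (Char.ofNat (65 + i.toNat - 1))) []
  -- return chars[n-1]  (IndexError → excluded by Pre_)
  match PySem.List.pyGet? chars (n - 1) with
  | some c => String.ofList [c]
  | none => ""

-- ===== PRECONDITION & SPEC =====
-- Pre_ excludes exactly the inputs where Python A raises IndexError (index n-1 outside the 325-element list).
def Pre_find_last_char (n : Int) : Prop := -324 ≤ n ∧ n ≤ 325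
instance (n : Int) : Decidable (Pre_find_last_char n) := by unfold Pre_find_last_char; infer_instance
def pvWitness_find_last_char : Int := 7
def Spec_find_last_char (n : Int) (out : String) : Prop := out = find_last_char_alt n
instance (n : Int) (out : String) : Decidable (Spec_find_last_char n out) := by unfold Spec_find_last_char; infer_instance

-- ===== CLAIM (what is proved, stated in full; the proofs are below) =====
def Claim_equal_find_last_char : Prop := ∀ (n : Int), Dom_find_last_char n → Pre_find_last_char n → Spec_find_last_char n (find_last_char n)

-- ===== LEMMAS AND PROOFS =====

-- The concrete lists the two ports index into.
def pvSeqA : List String :=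
  (PySem.List.pyRange 1 26 1).foldl (fun seq i =>
    (PySem.List.pyRange 1 (i + 1) 1).foldl (fun seq _j =>
      seq ++ [PySem.Str.join "" (((PySem.List.pyRange 0 i 1).map
        (fun x => String.ofList [Char.ofNat (65 + x.toNat)])))]) seq) []

def pvCharsB : List Char :=
  (PySem.List.pyRange 1 26 1).foldl (fun acc i =>
    acc ++ List.replicate i.toNat (Char.ofNat (65 + i.toNat - 1))) []

-- the comparator PySem.List.sorted2 (key = (len x, x), reverse = false) uses
def pvBefore (a b : String) : Bool :=
  decide (PySem.Str.len a < PySem.Str.len b) ||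
    (!decide (PySem.Str.len b < PySem.Str.len a) && decide (a < b))

theorem pv_sorted2_unfold :
    PySem.List.sorted2 pvSeqA (fun x => PySem.Str.len x) (fun x => x) false =
      pvSeqA.foldl (fun acc x => PySem.List.insertBy pvBefore x acc) [] := rfl

-- a stable insertion sort leaves a list alone when no element 'goes before' an earlier one
theorem pv_foldl_insertBy_eq (before : String → String → Bool) :
    ∀ (xs acc : List String),
      List.Pairwise (fun y x => before x y = false) xs →
      (∀ x ∈ xs, ∀ y ∈ acc, before x y = false) →
      xs.foldl (fun acc x => PySem.List.insertBy before x acc) acc = acc ++ xs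
  | [], acc, _, _ => by simp
  | x :: xs, acc, hp, hacc => by
    have hx : PySem.List.insertBy before x acc = acc ++ [x] :=
      PySem.List.insertBy_of_forall_not_before _ _ _ (hacc x (by simp))
    have hp' := (List.pairwise_cons.mp hp)
    have := pv_foldl_insertBy_eq before xs (acc ++ [x]) hp'.2 (by
      intro a ha y hy
      rcases List.mem_append.mp hy with h | h
      · exact hacc a (by simp [ha]) y h
      · simp only [List.mem_singleton] at h; subst h; exact hp'.1 a ha)
    simpa [hx, List.append_assoc] using this

-- length-monotone with equal strings on equal lengths: a kernel-checkable surrogate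
-- (String '<' itself does not kernel-reduce, so we decide this and convert)
set_option maxRecDepth 100000 in
theorem pv_surrogate :
    List.Pairwise (fun y x => PySem.Str.len y ≤ PySem.Str.len x ∧
      (PySem.Str.len y = PySem.Str.len x → y = x)) pvSeqA := by decide

theorem pv_pairwise : List.Pairwise (fun y x => pvBefore x y = false) pvSeqA := by
  refine pv_surrogate.imp ?_
  rintro a b ⟨hle, heq⟩
  unfold pvBefore
  simp only [PySem.Str.len_eq] at hle heq
  have hle' : a.length ≤ b.length := by exact_mod_cast hle
  simp
  refine ⟨hle', fun hge => ?_⟩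
  have h := heq (by exact_mod_cast le_antisymm hle' hge)
  subst h
  exact le_refl _

theorem pv_sorted_id :
    PySem.List.sorted2 pvSeqA (fun x => PySem.Str.len x) (fun x => x) false = pvSeqA := by
  rw [pv_sorted2_unfold, pv_foldl_insertBy_eq pvBefore pvSeqA [] pv_pairwise (by simp)]
  simp

-- one closed computation: the last characters of the generated sequence are exactly B's character list
set_option maxRecDepth 100000 in
theorem pv_key :
    pvSeqA.map (fun s => ((PySem.Str.pyGet? s (-1)).map (fun c => String.ofList [c])).getD "")
      = pvCharsB.map (fun c => String.ofList [c]) := by decide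

set_option maxRecDepth 100000 in
theorem pv_lenB : pvCharsB.length = 325 := by decide

theorem pyGet?_map {α β : Type} (f : α → β) (xs : List α) (i : Int) :
    PySem.List.pyGet? (xs.map f) i = (PySem.List.pyGet? xs i).map f := by
  simp only [PySem.List.pyGet?, PySem.List.pyIdx?, List.length_map]
  split_ifs <;> simp

-- ===== VERDICT (by name: the statement is the Claim_ definition above) =====
theorem find_last_char_spec : Claim_equal_find_last_char := by
  intro n _ hpre
  obtain ⟨h1, h2⟩ := hpre
  show find_last_char n = find_last_char_alt n
  have hA : find_last_char n =
      match PySem.List.pyGet? (PySem.List.sorted2 pvSeqA (fun x => PySem.Str.len x)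
          (fun x => x) false) (n - 1) with
      | some s => ((PySem.Str.pyGet? s (-1)).map (fun c => String.ofList [c])).getD ""
      | none => "" := rfl
  have hB : find_last_char_alt n =
      match PySem.List.pyGet? pvCharsB (n - 1) with
      | some c => String.ofList [c]
      | none => "" := rfl
  rw [hA, hB, pv_sorted_id]
  have hmap := congrArg (fun l => PySem.List.pyGet? l (n - 1)) pv_key
  simp only [pyGet?_map] at hmap
  have hsome : (PySem.List.pyGet? pvCharsB (n - 1)).isSome := by
    rw [Option.isSome_iff_ne_none]
    intro hnone
    rw [PySem.List.pyGet?_eq_none_iff] at hnone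
    apply hnone
    unfold PySem.Raise.InRange
    rw [pv_lenB]
    omega
  obtain ⟨c, hc⟩ := Option.isSome_iff_exists.mp hsome
  rw [hc] at hmap ⊢
  cases hs : PySem.List.pyGet? pvSeqA (n - 1) with
  | none => rw [hs] at hmap; simp at hmap
  | some s =>
      rw [hs] at hmap
      simp only [Option.map_some] at hmap
      simpa using hmap
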